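-- pv_equiv track=rewrite | github.com/f-o-o-g-s/eightbox | release.py | format_conventional_commit
-- ===== SOURCE A (Python) =====
-- COMMIT_TYPES = [
--     "feat",
--     "fix",
--     "docs",
--     "style",
--     "refactor",
--     "perf",
--     "test",
--     "build",
--     "ci",
--     "chore",
--     "revert",
-- ]
--
-- def format_conventional_commit(message, release_type):
--     """Format message to follow conventional commit standards.
--
--     Args:
--         message (str): The commit message
--         release_type (str): The type of release (patch, minor, major)
--
--     Returns:
--         str: Properly formatted conventional commit message
--     """
--     # If message already follows convention, return as is
--     if any(
--         message.startswith(f"{t}:")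
--         or message.startswith(f"{t}!:")
--         or message.startswith(f"{t}(")
--         for t in COMMIT_TYPES
--     ):
--         return message
--
--     # Auto-prefix based on release type
--     if release_type == "major":
--         prefix = "feat!"
--     elif release_type == "minor":
--         prefix = "feat"
--     else:  # patch
--         prefix = "fix"
--
--     return f"{prefix}: {message}"
-- ===== SOURCE B (Python) =====
-- COMMIT_SET = {
--     "feat", "fix", "docs", "style", "refactor", "perf",
--     "test", "build", "ci", "chore", "revert",
-- }
--
--
-- def format_conventional_commit(message, release_type):
--     """Format message to follow conventional commit standards.
--
--     Parse-then-lookup: take the maximal leading run of lowercase letters as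
--     the type token; the message is already conventional iff that token is in
--     COMMIT_SET and is followed by ':', '!:' or '('.
--     """
--     i = 0
--     while i < len(message) and "a" <= message[i] <= "z":
--         i += 1
--     token, rest = message[:i], message[i:]
--     if token in COMMIT_SET and (
--         rest.startswith(":") or rest.startswith("!:") or rest.startswith("(")
--     ):
--         return message
--     if release_type == "major":
--         prefix = "feat!"
--     elif release_type == "minor":
--         prefix = "feat"
--     else:
--         prefix = "fix"
--     return f"{prefix}: {message}"
-- ===== Notes on version B (the rewrite author's own statement) =====
-- stated objective: idiomatic
-- what changed: A scans all 11 commit types doing three startswith tests each; B parses the leading lowercase-letter token once and does a single set-membership test plus one delimiter check.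
import Mathlib
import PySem

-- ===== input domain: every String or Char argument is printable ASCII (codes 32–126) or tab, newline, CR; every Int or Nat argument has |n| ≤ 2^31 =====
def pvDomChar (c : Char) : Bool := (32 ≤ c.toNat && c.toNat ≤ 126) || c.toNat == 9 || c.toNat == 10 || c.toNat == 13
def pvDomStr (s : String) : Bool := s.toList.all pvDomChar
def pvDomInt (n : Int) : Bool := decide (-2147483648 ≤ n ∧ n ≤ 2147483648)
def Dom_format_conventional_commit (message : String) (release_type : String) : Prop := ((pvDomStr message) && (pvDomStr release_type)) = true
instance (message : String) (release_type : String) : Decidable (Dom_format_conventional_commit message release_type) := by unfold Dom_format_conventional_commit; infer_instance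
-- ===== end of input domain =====

-- B replaces A's scan over 11 commit types (three startswith tests each) by parsing the
-- leading lowercase token once and doing one set lookup plus one delimiter check (idiomatic).

-- ===== PORT A =====
def COMMIT_TYPES : List String :=
  ["feat", "fix", "docs", "style", "refactor", "perf", "test", "build", "ci", "chore", "revert"]

def format_conventional_commit (message : String) (release_type : String) : String :=
  if COMMIT_TYPES.any (fun t =>
      PySem.Str.startswith message (t ++ ":") ||
      PySem.Str.startswith message (t ++ "!:") ||
      PySem.Str.startswith message (t ++ "(")) then
    message
  else
    let pfx := if release_type == "major" then "feat!"
               else if release_type == "minor" then "feat"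
               else "fix"
    pfx ++ ": " ++ message

-- ===== PORT B =====
def pvLow (c : Char) : Bool := decide ('a' ≤ c) && decide (c ≤ 'z')

-- the while-loop of Source B: split off the maximal leading run of lowercase letters
def pvSplitLow : List Char → List Char × List Char
  | [] => ([], [])
  | c :: cs =>
    if pvLow c then
      let p := pvSplitLow cs
      (c :: p.1, p.2)
    else ([], c :: cs)

def COMMIT_SET : PySem.Set (List Char) :=
  PySem.Set.ofList
    ["feat".toList, "fix".toList, "docs".toList, "style".toList, "refactor".toList,
     "perf".toList, "test".toList, "build".toList, "ci".toList, "chore".toList,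
     "revert".toList]

def format_conventional_commit_alt (message : String) (release_type : String) : String :=
  let p := pvSplitLow message.toList
  if COMMIT_SET.contains p.1 &&
      (List.isPrefixOf [':'] p.2 || List.isPrefixOf ['!', ':'] p.2 ||
       List.isPrefixOf ['('] p.2) then
    message
  else
    let pfx := if release_type == "major" then "feat!"
               else if release_type == "minor" then "feat"
               else "fix"
    pfx ++ ": " ++ message

-- ===== PRECONDITION & SPEC =====
def Spec_format_conventional_commit (message : String) (release_type : String) (out : String) : Prop := out = format_conventional_commit_alt message release_type
instance (message : String) (release_type : String) (out : String) : Decidable (Spec_format_conventional_commit message release_type out) := by unfold Spec_format_conventional_commit; infer_instance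

-- ===== CLAIM (what is proved, stated in full; the proofs are below) =====
def Claim_equal_format_conventional_commit : Prop := ∀ (message : String) (release_type : String), Dom_format_conventional_commit message release_type → Spec_format_conventional_commit message release_type (format_conventional_commit message release_type)

-- ===== LEMMAS AND PROOFS =====

lemma pvSplitLow_eq (l : List Char) :
    pvSplitLow l = (l.takeWhile pvLow, l.dropWhile pvLow) := by
  induction l with
  | nil => rfl
  | cons c cs ih =>
    simp only [pvSplitLow, List.takeWhile_cons, List.dropWhile_cons]
    by_cases h : pvLow c = true <;> simp [h, ih]

-- a word of lowercase letters followed by a non-lowercase delimiter is a prefix of l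
-- iff the word is exactly l's maximal lowercase run and the delimiter follows it
lemma prefix_decomp (t : List Char) (c : Char) (d l : List Char)
    (ht : ∀ x ∈ t, pvLow x = true) (hc : pvLow c = false) :
    ((t ++ c :: d) <+: l) ↔ (l.takeWhile pvLow = t ∧ (c :: d) <+: l.dropWhile pvLow) := by
  induction t generalizing l with
  | nil =>
    cases l with
    | nil => simp
    | cons a l' =>
      by_cases ha : pvLow a = true
      · have hne : c ≠ a := fun h => by rw [h] at hc; rw [hc] at ha; exact Bool.false_ne_true ha
        simp [ha, List.cons_prefix_cons, hne]
      · simp [ha]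
  | cons x t' ih =>
    have hx : pvLow x = true := ht x (List.mem_cons_self ..)
    cases l with
    | nil => simp
    | cons a l' =>
      by_cases ha : pvLow a = true
      · have := ih (fun y hy => ht y (List.mem_cons_of_mem _ hy)) (l := l')
        simp [ha, List.cons_prefix_cons, this,
          and_assoc, eq_comm]
      · have hne : x ≠ a := fun h => by rw [h] at hx; rw [hx] at ha; exact ha rfl
        simp [ha, List.cons_prefix_cons, hne]

set_option maxHeartbeats 1000000 in
lemma any_decomp (l : List Char) (ts : List String)
    (h : ∀ t ∈ ts, ∀ x ∈ t.toList, pvLow x = true) :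
    (ts.any (fun t =>
        PySem.Chars.startswith l (t ++ ":").toList ||
        PySem.Chars.startswith l (t ++ "!:").toList ||
        PySem.Chars.startswith l (t ++ "(").toList) = true)
    ↔ ((ts.map String.toList).contains (l.takeWhile pvLow) = true ∧
        ([':'] <+: l.dropWhile pvLow ∨ ['!', ':'] <+: l.dropWhile pvLow ∨
         ['('] <+: l.dropWhile pvLow)) := by
  induction ts with
  | nil => simp
  | cons t ts' ih =>
    have ht : ∀ x ∈ t.toList, pvLow x = true := h t (List.mem_cons_self ..)
    have ih' := ih (fun u hu => h u (List.mem_cons_of_mem _ hu))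
    have e1 : (t ++ ":").toList = t.toList ++ ':' :: [] := by
      simp [String.toList_append]
    have e2 : (t ++ "!:").toList = t.toList ++ '!' :: [':'] := by
      simp [String.toList_append]
    have e3 : (t ++ "(").toList = t.toList ++ '(' :: [] := by
      simp [String.toList_append]
    have hcolon : pvLow ':' = false := by decide
    have hbang : pvLow '!' = false := by decide
    have hparen : pvLow '(' = false := by decide
    simp only [List.any_cons, List.map_cons, List.contains_cons, Bool.or_eq_true,
      PySem.Chars.startswith_iff, e1, e2, e3,
      prefix_decomp t.toList ':' [] l ht hcolon,
      prefix_decomp t.toList '!' [':'] l ht hbang,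
      prefix_decomp t.toList '(' [] l ht hparen, ih', beq_iff_eq]
    constructor
    · rintro (((⟨he, hp⟩ | ⟨he, hp⟩) | ⟨he, hp⟩) | ⟨hm, hp⟩) <;> tauto
    · rintro ⟨(he | hm), hp⟩ <;> tauto

set_option maxHeartbeats 1000000 in
lemma cond_eq (message : String) :
    COMMIT_TYPES.any (fun t =>
        PySem.Str.startswith message (t ++ ":") ||
        PySem.Str.startswith message (t ++ "!:") ||
        PySem.Str.startswith message (t ++ "(")) =
    (COMMIT_SET.contains (pvSplitLow message.toList).1 &&
      (List.isPrefixOf [':'] (pvSplitLow message.toList).2 ||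
       List.isPrefixOf ['!', ':'] (pvSplitLow message.toList).2 ||
       List.isPrefixOf ['('] (pvSplitLow message.toList).2)) := by
  have hset : COMMIT_SET = COMMIT_TYPES.map String.toList := by
    have h := PySem.Set.ofList_eq_self_of_nodup
      (xs := ["feat".toList, "fix".toList, "docs".toList, "style".toList, "refactor".toList,
              "perf".toList, "test".toList, "build".toList, "ci".toList, "chore".toList,
              "revert".toList]) (by decide)
    simpa [COMMIT_TYPES, COMMIT_SET] using h
  rw [Bool.eq_iff_iff]
  simp only [PySem.Str.startswith_eq, pvSplitLow_eq, hset, Bool.and_eq_true,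
    Bool.or_eq_true, List.isPrefixOf_iff_prefix, PySem.Set.contains_eq_listContains, or_assoc]
  have hall : ∀ t ∈ COMMIT_TYPES, ∀ x ∈ t.toList, pvLow x = true := by
    simp [COMMIT_TYPES]
    decide
  exact any_decomp message.toList COMMIT_TYPES hall

-- ===== VERDICT (by name: the statement is the Claim_ definition above) =====
theorem format_conventional_commit_spec : Claim_equal_format_conventional_commit := by
  intro message release_type _
  unfold Spec_format_conventional_commit format_conventional_commit format_conventional_commit_alt
  rw [cond_eq]
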